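-- pv_equiv track=rewrite | github.com/jclgoodwin/bustimes.org | txc/txc.py | correct_description
-- ===== SOURCE A (Python) =====
-- def correct_description(description):
--     """Given an description, return a version with any typos pedantically corrected"""
--     for old, new in (
--             ('Stitians', 'Stithians'),
--             ('Kings Lynn', "King's Lynn"),
--             ('Baasingstoke', 'Basingstoke'),
--             ('Tauton', 'Taunton'),
--     ):
--         description = description.replace(old, new)
--     return description
-- ===== SOURCE B (Python) =====
-- def correct_description(description):
--     """Given an description, return a version with any typos pedantically corrected"""
--     fixes = {
--         'Stitians': 'Stithians',
--         'Kings Lynn': "King's Lynn",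
--         'Baasingstoke': 'Basingstoke',
--         'Tauton': 'Taunton',
--     }
--     out = []
--     i = 0
--     n = len(description)
--     while i < n:
--         for typo in fixes:
--             if description.startswith(typo, i):
--                 out.append(fixes[typo])
--                 i += len(typo)
--                 break
--         else:
--             out.append(description[i])
--             i += 1
--     return ''.join(out)
-- ===== Notes on version B (the rewrite author's own statement) =====
-- stated objective: alternative
-- what changed: B makes a single left-to-right scan over the string, trying the four typo patterns at each position and emitting either the correction or the current character, instead of A's four independent full-string replace passes.
import Mathlib
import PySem

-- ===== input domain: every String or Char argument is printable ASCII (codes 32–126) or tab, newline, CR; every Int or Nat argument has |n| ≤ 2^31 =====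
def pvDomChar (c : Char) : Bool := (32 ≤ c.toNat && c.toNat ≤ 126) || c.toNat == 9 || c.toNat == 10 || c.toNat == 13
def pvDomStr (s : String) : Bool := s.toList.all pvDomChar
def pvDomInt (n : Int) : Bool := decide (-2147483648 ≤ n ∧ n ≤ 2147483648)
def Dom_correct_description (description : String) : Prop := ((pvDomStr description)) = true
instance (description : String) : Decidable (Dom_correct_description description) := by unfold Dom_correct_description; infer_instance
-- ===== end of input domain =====

-- B replaces A's four sequential full-string `.replace` passes by one left-to-right scan
-- that matches any of the four typos at each position (alternative decomposition, same cost class).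


-- ===== PORT A =====
-- literal transliteration of A: fold the fixed (old, new) tuple through str.replace
def correct_description (description : String) : String :=
  [("Stitians", "Stithians"),
   ("Kings Lynn", "King's Lynn"),
   ("Baasingstoke", "Basingstoke"),
   ("Tauton", "Taunton")].foldl
    (fun d (p : String × String) => PySem.Str.replace d p.1 p.2) description

-- ===== PORT B =====
-- single scan over the characters: at each position try the four typos in order
-- (B's while/for-else loop with an output accumulator, as the obvious structural recursion)
def scanB : List Char → List Char
  | [] => []
  | c :: t =>
    if ("Stitians".toList).isPrefixOf (c :: t) then
      "Stithians".toList ++ scanB (List.drop 7 t)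
    else if ("Kings Lynn".toList).isPrefixOf (c :: t) then
      "King's Lynn".toList ++ scanB (List.drop 9 t)
    else if ("Baasingstoke".toList).isPrefixOf (c :: t) then
      "Basingstoke".toList ++ scanB (List.drop 11 t)
    else if ("Tauton".toList).isPrefixOf (c :: t) then
      "Taunton".toList ++ scanB (List.drop 5 t)
    else
      c :: scanB t
termination_by l => l.length
decreasing_by
  · simpa using Nat.lt_succ_of_le (List.length_drop_le 7 t)
  · simpa using Nat.lt_succ_of_le (List.length_drop_le 9 t)
  · simpa using Nat.lt_succ_of_le (List.length_drop_le 11 t)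
  · simpa using Nat.lt_succ_of_le (List.length_drop_le 5 t)
  · simp

def correct_description_alt (description : String) : String :=
  String.ofList (scanB description.toList)

-- ===== PRECONDITION & SPEC =====
def Spec_correct_description (description : String) (out : String) : Prop := out = correct_description_alt description
instance (description : String) (out : String) : Decidable (Spec_correct_description description out) := by unfold Spec_correct_description; infer_instance

-- ===== CLAIM (what is proved, stated in full; the proofs are below) =====
def Claim_equal_correct_description : Prop := ∀ (description : String), Dom_correct_description description → Spec_correct_description description (correct_description description)

-- ===== LEMMAS AND PROOFS =====

-- string-literal decompositions (head char made explicit)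
lemma litK1 : ("Stitians" : String).toList = 'S' :: "titians".toList := rfl
lemma litK2 : ("Kings Lynn" : String).toList = 'K' :: "ings Lynn".toList := rfl
lemma litK3 : ("Baasingstoke" : String).toList = 'B' :: "aasingstoke".toList := rfl
lemma litK4 : ("Tauton" : String).toList = 'T' :: "auton".toList := rfl
lemma litV1 : ("Stithians" : String).toList = 'S' :: "tithians".toList := rfl
lemma litV2 : ("King's Lynn" : String).toList = 'K' :: "ing's Lynn".toList := rfl
lemma litV3 : ("Basingstoke" : String).toList = 'B' :: "asingstoke".toList := rfl

-- a simple structural restatement of Python's str.replace (old = o0 :: os, so nonempty)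
def rep (o0 : Char) (os new : List Char) : List Char -> List Char
  | [] => []
  | c :: t =>
    if (o0 :: os).isPrefixOf (c :: t) then new ++ rep o0 os new (List.drop os.length t)
    else c :: rep o0 os new t
termination_by l => l.length
decreasing_by
  · simpa using Nat.lt_succ_of_le (List.length_drop_le os.length t)
  · simp

lemma rep_nil (o0 : Char) (os new : List Char) : rep o0 os new [] = [] := by
  rw [rep]

lemma rep_cons_not (o0 : Char) (os new : List Char) (c : Char) (t : List Char)
    (h : ¬ (o0 :: os).isPrefixOf (c :: t)) :
    rep o0 os new (c :: t) = c :: rep o0 os new t := by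
  rw [rep, if_neg h]

lemma go_eq (o0 : Char) (os new : List Char) :
    ∀ (fuel : Nat) (l acc : List Char), l.length ≤ fuel ->
      PySem.Chars.replace.go (o0 :: os) new fuel l acc = acc.reverse ++ rep o0 os new l := by
  intro fuel
  induction fuel with
  | zero =>
    intro l acc h
    have : l = [] := List.eq_nil_of_length_eq_zero (Nat.le_zero.mp h)
    subst this
    simp [PySem.Chars.replace.go, rep_nil]
  | succ n ih =>
    intro l acc h
    match l with
    | [] => simp [PySem.Chars.replace.go, rep_nil]
    | c :: t =>
      rw [PySem.Chars.replace.go]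
      by_cases hp : (o0 :: os).isPrefixOf (c :: t)
      · rw [if_pos hp, rep, if_pos hp]
        have hlen : (List.drop (o0 :: os).length (c :: t)).length ≤ n := by
          simp at h ⊢; omega
        have hd : List.drop (o0 :: os).length (c :: t) = List.drop os.length t := by
          simp [List.drop_succ_cons]
        rw [hd] at hlen ⊢
        rw [ih _ _ hlen]
        simp
      · rw [if_neg hp, rep_cons_not o0 os new c t hp]
        have hlen : t.length ≤ n := by simp at h; omega
        rw [ih _ _ hlen]
        simp

lemma replace_eq_rep (s : List Char) (o0 : Char) (os new : List Char) :
    PySem.Chars.replace s (o0 :: os) new = rep o0 os new s := by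
  rw [PySem.Chars.replace]
  simp [go_eq o0 os new s.length s [] (le_refl _)]

-- pass-through: rep copies a block that contains no occurrence of the pattern's first char
lemma rep_pass (o0 : Char) (os new : List Char) :
    ∀ (p x : List Char), (∀ c ∈ p, c ≠ o0) ->
      rep o0 os new (p ++ x) = p ++ rep o0 os new x := by
  intro p
  induction p with
  | nil => simp
  | cons a p ih =>
    intro x hp
    have hnp : ¬ (o0 :: os).isPrefixOf (a :: (p ++ x)) := by
      intro hc
      rcases List.isPrefixOf_iff_prefix.mp hc with ⟨r, hr⟩
      have ha : a = o0 := by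
        have := congrArg (fun l => l.headI) hr
        simpa using this.symm
      exact hp a (by simp) ha
    rw [List.cons_append, rep_cons_not _ _ _ _ _ hnp,
        ih x (fun c hc => hp c (by simp [hc]))]
    simp

-- match at the front: rep rewrites the pattern and continues after it
lemma rep_match (o0 : Char) (os new x : List Char) :
    rep o0 os new ((o0 :: os) ++ x) = new ++ rep o0 os new x := by
  rw [List.cons_append, rep, if_pos]
  · rw [List.drop_append_of_le_length (le_refl _)]
    simp
  · exact List.isPrefixOf_iff_prefix.mpr ⟨x, by simp⟩

-- if rep's output has a prefix t avoiding the first char of `new`, the input had prefix t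
lemma rep_take (o0 : Char) (os : List Char) (n0 : Char) (ns : List Char) :
    ∀ (m : Nat) (l t : List Char), l.length ≤ m -> (∀ c ∈ t, c ≠ n0) ->
      List.take t.length (rep o0 os (n0 :: ns) l) = t -> List.take t.length l = t := by
  intro m
  induction m with
  | zero =>
    intro l t hl ht h
    have : l = [] := List.eq_nil_of_length_eq_zero (Nat.le_zero.mp hl)
    subst this
    rw [rep_nil] at h
    simpa using h
  | succ n ih =>
    intro l t hl ht h
    match l with
    | [] =>
      rw [rep_nil] at h
      simpa using h
    | c :: t' =>
      by_cases hp : (o0 :: os).isPrefixOf (c :: t')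
      · rw [rep, if_pos hp] at h
        match t with
        | [] => simp
        | t0 :: ts =>
          exfalso
          apply ht t0 (by simp)
          have := congrArg (fun l => l.headI) h
          simpa using this.symm
      · rw [rep_cons_not _ _ _ _ _ hp] at h
        match t with
        | [] => simp
        | t0 :: ts =>
          simp [List.take_succ_cons] at h ⊢
          have hlen : t'.length ≤ n := by simp at hl; omega
          exact ⟨h.1, ih t' ts hlen (fun c hc => ht c (by simp [hc])) h.2⟩

lemma rep_not_prefix (o0 : Char) (os : List Char) (n0 : Char) (ns k l : List Char)
    (hk : ∀ c ∈ k, c ≠ n0) (h : ¬ k.isPrefixOf l) :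
    ¬ k.isPrefixOf (rep o0 os (n0 :: ns) l) := by
  intro hc
  apply h
  have ht : List.take k.length (rep o0 os (n0 :: ns) l) = k :=
    (List.prefix_iff_eq_take.mp (List.isPrefixOf_iff_prefix.mp hc)).symm
  have := rep_take o0 os n0 ns l.length l k (le_refl _) hk ht
  exact List.isPrefixOf_iff_prefix.mpr (List.prefix_iff_eq_take.mpr this.symm)

-- the four passes, as functions of the character list
def rep1 (l : List Char) : List Char := rep 'S' "titians".toList "Stithians".toList l
def rep2 (l : List Char) : List Char := rep 'K' "ings Lynn".toList "King's Lynn".toList l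
def rep3 (l : List Char) : List Char := rep 'B' "aasingstoke".toList "Basingstoke".toList l
def rep4 (l : List Char) : List Char := rep 'T' "auton".toList "Taunton".toList l

lemma rep1_not_prefix (k l : List Char) (hk : ∀ c ∈ k, c ≠ 'S') (h : ¬ k.isPrefixOf l) :
    ¬ k.isPrefixOf (rep1 l) := by
  simp only [rep1, litV1]
  exact rep_not_prefix _ _ _ _ _ _ hk h

lemma rep2_not_prefix (k l : List Char) (hk : ∀ c ∈ k, c ≠ 'K') (h : ¬ k.isPrefixOf l) :
    ¬ k.isPrefixOf (rep2 l) := by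
  simp only [rep2, litV2]
  exact rep_not_prefix _ _ _ _ _ _ hk h

lemma rep3_not_prefix (k l : List Char) (hk : ∀ c ∈ k, c ≠ 'B') (h : ¬ k.isPrefixOf l) :
    ¬ k.isPrefixOf (rep3 l) := by
  simp only [rep3, litV3]
  exact rep_not_prefix _ _ _ _ _ _ hk h

lemma rep1_match (x : List Char) : rep1 ("Stitians".toList ++ x) = "Stithians".toList ++ rep1 x := by
  simp only [rep1, litK1]; exact rep_match _ _ _ _

lemma rep2_match (x : List Char) : rep2 ("Kings Lynn".toList ++ x) = "King's Lynn".toList ++ rep2 x := by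
  simp only [rep2, litK2]; exact rep_match _ _ _ _

lemma rep3_match (x : List Char) : rep3 ("Baasingstoke".toList ++ x) = "Basingstoke".toList ++ rep3 x := by
  simp only [rep3, litK3]; exact rep_match _ _ _ _

lemma rep4_match (x : List Char) : rep4 ("Tauton".toList ++ x) = "Taunton".toList ++ rep4 x := by
  simp only [rep4, litK4]; exact rep_match _ _ _ _

lemma rep1_pass (p x : List Char) (hp : ∀ c ∈ p, c ≠ 'S') : rep1 (p ++ x) = p ++ rep1 x := by
  simp only [rep1]; exact rep_pass _ _ _ p x hp

lemma rep2_pass (p x : List Char) (hp : ∀ c ∈ p, c ≠ 'K') : rep2 (p ++ x) = p ++ rep2 x := by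
  simp only [rep2]; exact rep_pass _ _ _ p x hp

lemma rep3_pass (p x : List Char) (hp : ∀ c ∈ p, c ≠ 'B') : rep3 (p ++ x) = p ++ rep3 x := by
  simp only [rep3]; exact rep_pass _ _ _ p x hp

lemma rep4_pass (p x : List Char) (hp : ∀ c ∈ p, c ≠ 'T') : rep4 (p ++ x) = p ++ rep4 x := by
  simp only [rep4]; exact rep_pass _ _ _ p x hp

lemma rep1_cons (c : Char) (t : List Char) (h : ¬ ("Stitians".toList).isPrefixOf (c :: t)) :
    rep1 (c :: t) = c :: rep1 t := by
  simp only [rep1]; exact rep_cons_not _ _ _ _ _ (litK1 ▸ h)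

lemma rep2_cons (c : Char) (t : List Char) (h : ¬ ("Kings Lynn".toList).isPrefixOf (c :: t)) :
    rep2 (c :: t) = c :: rep2 t := by
  simp only [rep2]; exact rep_cons_not _ _ _ _ _ (litK2 ▸ h)

lemma rep3_cons (c : Char) (t : List Char) (h : ¬ ("Baasingstoke".toList).isPrefixOf (c :: t)) :
    rep3 (c :: t) = c :: rep3 t := by
  simp only [rep3]; exact rep_cons_not _ _ _ _ _ (litK3 ▸ h)

lemma rep4_cons (c : Char) (t : List Char) (h : ¬ ("Tauton".toList).isPrefixOf (c :: t)) :
    rep4 (c :: t) = c :: rep4 t := by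
  simp only [rep4]; exact rep_cons_not _ _ _ _ _ (litK4 ▸ h)

lemma scan_eq (n : Nat) : ∀ cs : List Char, cs.length ≤ n ->
    scanB cs = rep4 (rep3 (rep2 (rep1 cs))) := by
  induction n with
  | zero =>
    intro cs h
    have : cs = [] := List.eq_nil_of_length_eq_zero (Nat.le_zero.mp h)
    subst this
    simp [scanB, rep1, rep2, rep3, rep4, rep_nil]
  | succ n ih =>
    intro cs h
    match cs with
    | [] => simp [scanB, rep1, rep2, rep3, rep4, rep_nil]
    | c :: t =>
      by_cases h1 : ("Stitians".toList).isPrefixOf (c :: t)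
      · obtain ⟨x, hx⟩ := List.isPrefixOf_iff_prefix.mp h1
        have hxl : x.length ≤ n := by
          have := congrArg List.length hx; simp at this h; omega
        have ht : "titians".toList ++ x = t := by
          rw [litK1, List.cons_append] at hx
          injection hx with _ h'
        have hdrop : List.drop 7 t = x := by rw [← ht]; rfl
        have hscan : scanB (c :: t) = "Stithians".toList ++ scanB x := by
          rw [scanB, if_pos h1, hdrop]
        rw [hscan, ih x hxl, ← hx, rep1_match,
            rep2_pass _ _ (by simp), rep3_pass _ _ (by simp), rep4_pass _ _ (by simp)]
      · by_cases h2 : ("Kings Lynn".toList).isPrefixOf (c :: t)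
        · obtain ⟨x, hx⟩ := List.isPrefixOf_iff_prefix.mp h2
          have hxl : x.length ≤ n := by
            have := congrArg List.length hx; simp at this h; omega
          have ht : "ings Lynn".toList ++ x = t := by
            rw [litK2, List.cons_append] at hx
            injection hx with _ h'
          have hdrop : List.drop 9 t = x := by rw [← ht]; rfl
          have hscan : scanB (c :: t) = "King's Lynn".toList ++ scanB x := by
            rw [scanB, if_neg h1, if_pos h2, hdrop]
          rw [hscan, ih x hxl, ← hx, rep1_pass _ _ (by simp), rep2_match,
              rep3_pass _ _ (by simp), rep4_pass _ _ (by simp)]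
        · by_cases h3 : ("Baasingstoke".toList).isPrefixOf (c :: t)
          · obtain ⟨x, hx⟩ := List.isPrefixOf_iff_prefix.mp h3
            have hxl : x.length ≤ n := by
              have := congrArg List.length hx; simp at this h; omega
            have ht : "aasingstoke".toList ++ x = t := by
              rw [litK3, List.cons_append] at hx
              injection hx with _ h'
            have hdrop : List.drop 11 t = x := by rw [← ht]; rfl
            have hscan : scanB (c :: t) = "Basingstoke".toList ++ scanB x := by
              rw [scanB, if_neg h1, if_neg h2, if_pos h3, hdrop]
            rw [hscan, ih x hxl, ← hx, rep1_pass _ _ (by simp), rep2_pass _ _ (by simp),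
                rep3_match, rep4_pass _ _ (by simp)]
          · by_cases h4 : ("Tauton".toList).isPrefixOf (c :: t)
            · obtain ⟨x, hx⟩ := List.isPrefixOf_iff_prefix.mp h4
              have hxl : x.length ≤ n := by
                have := congrArg List.length hx; simp at this h; omega
              have ht : "auton".toList ++ x = t := by
                rw [litK4, List.cons_append] at hx
                injection hx with _ h'
              have hdrop : List.drop 5 t = x := by rw [← ht]; rfl
              have hscan : scanB (c :: t) = "Taunton".toList ++ scanB x := by
                rw [scanB, if_neg h1, if_neg h2, if_neg h3, if_pos h4, hdrop]
              rw [hscan, ih x hxl, ← hx, rep1_pass _ _ (by simp), rep2_pass _ _ (by simp),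
                  rep3_pass _ _ (by simp), rep4_match]
            · -- no pattern matches at the head: every pass copies c
              have htl : t.length ≤ n := by simp at h; omega
              have e1 : rep1 (c :: t) = c :: rep1 t := rep1_cons c t h1
              have n2 : ¬ ("Kings Lynn".toList).isPrefixOf (rep1 (c :: t)) :=
                rep1_not_prefix _ _ (by simp) h2
              have e2 : rep2 (rep1 (c :: t)) = c :: rep2 (rep1 t) := by
                rw [e1] at n2 ⊢
                exact rep2_cons _ _ n2
              have n3 : ¬ ("Baasingstoke".toList).isPrefixOf (rep2 (rep1 (c :: t))) :=
                rep2_not_prefix _ _ (by simp) (rep1_not_prefix _ _ (by simp) h3)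
              have e3 : rep3 (rep2 (rep1 (c :: t))) = c :: rep3 (rep2 (rep1 t)) := by
                rw [e2] at n3 ⊢
                exact rep3_cons _ _ n3
              have n4 : ¬ ("Tauton".toList).isPrefixOf (rep3 (rep2 (rep1 (c :: t)))) :=
                rep3_not_prefix _ _ (by simp)
                  (rep2_not_prefix _ _ (by simp)
                    (rep1_not_prefix _ _ (by simp) h4))
              have e4 : rep4 (rep3 (rep2 (rep1 (c :: t)))) = c :: rep4 (rep3 (rep2 (rep1 t))) := by
                rw [e3] at n4 ⊢
                exact rep4_cons _ _ n4
              rw [e4, ← ih t htl, scanB, if_neg h1, if_neg h2, if_neg h3, if_neg h4]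

-- ===== VERDICT (by name: the statement is the Claim_ definition above) =====
theorem correct_description_spec : Claim_equal_correct_description := by
  intro description _
  unfold Spec_correct_description correct_description correct_description_alt
  simp only [List.foldl]
  rw [PySem.Str.replace, PySem.Str.replace, PySem.Str.replace, PySem.Str.replace]
  simp only [String.toList_ofList]
  rw [litK1, litK2, litK3, litK4,
      replace_eq_rep, replace_eq_rep, replace_eq_rep, replace_eq_rep,
      scan_eq description.toList.length description.toList (le_refl _)]
  rfl
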